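-- pv_equiv track=rewrite | github.com/ViktorMarinov/no-smoke-search | no-smoke-search-app/model/inverse_index.py | merge_token_in_report
-- ===== SOURCE A (Python) =====
-- def merge_token_in_report(sorted_token_id):
--     token_id_freq = []
--     for token, id in sorted_token_id:
--         if token_id_freq:
--             prev_tok, prev_id, prev_freq = token_id_freq[-1]
--             if prev_tok == token and prev_id == id:
--                 token_id_freq[-1] = (token, id, prev_freq+1)
--             else:
--                 token_id_freq.append((token, id, 1))
--         else:
--             token_id_freq.append((token, id, 1))
--     return token_id_freq
-- ===== SOURCE B (Python) =====
-- def merge_token_in_report(sorted_token_id):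
--     n = len(sorted_token_id)
--     # staged passes: (1) run-start indices, (2) run ends, (3) assemble triples
--     starts = [i for i in range(n)
--               if i == 0 or sorted_token_id[i] != sorted_token_id[i - 1]]
--     ends = starts[1:] + [n]
--     return [(sorted_token_id[s][0], sorted_token_id[s][1], e - s)
--             for s, e in zip(starts, ends)]
-- ===== Notes on version B (the rewrite author's own statement) =====
-- stated objective: alternative
-- what changed: Instead of one pass that inspects and rewrites the last appended triple, B works in staged passes over indices: it first collects the run-start indices (positions where an element differs from its predecessor), pairs each start with the next start (or n) as run end, and maps each (start,end) pair to (token,id,end-start).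
import Mathlib
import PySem

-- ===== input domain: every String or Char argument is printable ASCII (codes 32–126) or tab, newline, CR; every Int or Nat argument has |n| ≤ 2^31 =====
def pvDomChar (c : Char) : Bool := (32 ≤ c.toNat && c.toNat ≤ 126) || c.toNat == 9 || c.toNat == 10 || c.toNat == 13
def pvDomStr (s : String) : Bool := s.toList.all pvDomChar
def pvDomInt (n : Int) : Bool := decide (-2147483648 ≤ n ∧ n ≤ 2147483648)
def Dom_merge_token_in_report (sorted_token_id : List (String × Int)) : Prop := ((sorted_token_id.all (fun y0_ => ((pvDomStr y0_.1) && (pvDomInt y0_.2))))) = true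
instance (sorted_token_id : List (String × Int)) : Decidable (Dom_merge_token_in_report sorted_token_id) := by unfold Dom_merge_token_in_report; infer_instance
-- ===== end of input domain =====

-- B replaces A's single-pass rewrite-the-last-appended-triple accumulator with staged index
-- passes: collect run-start indices, pair them with run ends, map to (token,id,count) triples.


-- ===== PORT A =====
-- A's loop body: look at the last appended triple; if it matches, replace it with count+1,
-- otherwise append a fresh (token, id, 1).
def mtirStepA (acc : List (String × Int × Int)) (p : String × Int) : List (String × Int × Int) :=
  match acc.getLast? with
  | some (prev_tok, prev_id, prev_freq) =>
      if prev_tok = p.1 ∧ prev_id = p.2 then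
        acc.dropLast ++ [(p.1, p.2, prev_freq + 1)]
      else
        acc ++ [(p.1, p.2, 1)]
  | none => acc ++ [(p.1, p.2, 1)]

def merge_token_in_report (sorted_token_id : List (String × Int)) : List (String × Int × Int) :=
  sorted_token_id.foldl mtirStepA []

-- ===== PORT B =====
-- Source B stage 1: the run-start indices, i.e. the i with i == 0 or xs[i] != xs[i-1]
-- ('or' short-circuits, so xs[i-1] is never read at i == 0, exactly as in Python).
def mtirStarts (xs : List (String × Int)) : List Nat :=
  (List.range xs.length).filter (fun i => i == 0 || decide (xs[i]? ≠ xs[i - 1]?))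

-- Source B stages 2–3: run ends = next start (or n); each (s, e) becomes (token, id, e - s).
-- Every start index s is < n, so the getElem? lookup never takes the none branch.
def merge_token_in_report_alt (sorted_token_id : List (String × Int)) : List (String × Int × Int) :=
  let n := sorted_token_id.length
  let starts := mtirStarts sorted_token_id
  let ends := starts.drop 1 ++ [n]
  (starts.zip ends).map (fun se =>
    match sorted_token_id[se.1]? with
    | some p => (p.1, p.2, (se.2 : Int) - (se.1 : Int))
    | none => ("", 0, 0))

-- ===== PRECONDITION & SPEC =====
def Spec_merge_token_in_report (sorted_token_id : List (String × Int)) (out : List (String × Int × Int)) : Prop := out = merge_token_in_report_alt sorted_token_id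
instance (sorted_token_id : List (String × Int)) (out : List (String × Int × Int)) : Decidable (Spec_merge_token_in_report sorted_token_id out) := by unfold Spec_merge_token_in_report; infer_instance

-- ===== CLAIM (what is proved, stated in full; the proofs are below) =====
def Claim_equal_merge_token_in_report : Prop := ∀ (sorted_token_id : List (String × Int)), Dom_merge_token_in_report sorted_token_id → Spec_merge_token_in_report sorted_token_id (merge_token_in_report sorted_token_id)

-- ===== LEMMAS AND PROOFS =====

-- Proof-side reference function: run-length encoding by recursion on runs.
def mtirRLE (xs : List (String × Int)) : List (String × Int × Int) :=
  match xs with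
  | [] => []
  | p :: rest =>
      (p.1, p.2, 1 + ((rest.takeWhile (· = p)).length : Int)) :: mtirRLE (rest.dropWhile (· = p))
termination_by xs.length
decreasing_by
  simpa using Nat.lt_succ_of_le (List.length_dropWhile_le _ _)

theorem mtir_rle_cons (p : String × Int) (rest : List (String × Int)) :
    mtirRLE (p :: rest) =
      (p.1, p.2, (1 : Int) + ((rest.takeWhile (· = p)).length : Int)) ::
        mtirRLE (rest.dropWhile (· = p)) := by
  rw [mtirRLE]

-- A-side invariant: running A's loop with the accumulator ending in an open run (t, i, n)
-- extends that run by the matching prefix of xs and then behaves like mtirRLE on the rest.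
theorem mtir_loop_inv (xs : List (String × Int)) :
    ∀ (acc : List (String × Int × Int)) (t : String) (i : Int) (n : Int),
      List.foldl mtirStepA (acc ++ [(t, i, n)]) xs =
        acc ++ (t, i, n + (xs.takeWhile (· = (t, i))).length) ::
          mtirRLE (xs.dropWhile (· = (t, i))) := by
  induction xs with
  | nil => intro acc t i n; simp [mtirRLE]
  | cons p rest ih =>
    intro acc t i n
    by_cases hp : p = (t, i)
    · subst hp
      have hstep : mtirStepA (acc ++ [(t, i, n)]) (t, i) = acc ++ [(t, i, n + 1)] := by
        simp [mtirStepA]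
      simp only [List.foldl_cons, hstep, ih, List.takeWhile_cons, List.dropWhile_cons]
      simp
      ring_nf
    · have hne : ¬ (t = p.1 ∧ i = p.2) := by
        rintro ⟨h1, h2⟩; exact hp (by cases p; simp_all)
      have hstep : mtirStepA (acc ++ [(t, i, n)]) p =
          (acc ++ [(t, i, n)]) ++ [(p.1, p.2, 1)] := by
        simp [mtirStepA, hne]
      have hpe : ((p.1, p.2) : String × Int) = p := by cases p; rfl
      simp only [List.foldl_cons, hstep]
      rw [ih (acc ++ [(t, i, n)]) p.1 p.2 1]
      have hdec : (decide (p = (t, i))) = false := by simp [hp]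
      rw [List.takeWhile_cons, List.dropWhile_cons]
      simp only [hdec, Bool.false_eq_true, if_false]
      rw [mtir_rle_cons]
      simp [hpe]

-- A equals the reference run-length encoder.
theorem mtir_A_eq_rle (xs : List (String × Int)) : merge_token_in_report xs = mtirRLE xs := by
  unfold merge_token_in_report
  cases xs with
  | nil => simp [mtirRLE]
  | cons p rest =>
    have h0 : mtirStepA [] p = [] ++ [(p.1, p.2, 1)] := by simp [mtirStepA]
    rw [List.foldl_cons, h0, mtir_loop_inv rest [] p.1 p.2 1]
    rw [mtir_rle_cons]
    have hpe : ((p.1, p.2) : String × Int) = p := by cases p; rfl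
    simp [hpe]

-- The first element of a dropWhile result fails the predicate (specialised to (· = p)).
theorem mtir_drop_head_ne {α : Type} [DecidableEq α] (l : List α) (p y : α) (ys : List α)
    (h : l.dropWhile (· = p) = y :: ys) : y ≠ p := by
  induction l with
  | nil => simp at h
  | cons a l ih =>
    rw [List.dropWhile_cons] at h
    split at h
    · exact ih h
    · cases h; simp_all

-- Inside the leading run, every lookup yields p.
theorem mtir_get_run (p : String × Int) (rest : List (String × Int)) {i : Nat}
    (hi : i < (rest.takeWhile (· = p)).length + 1) :
    (p :: rest)[i]? = some p := by
  have hsplit : p :: rest = (p :: rest.takeWhile (· = p)) ++ rest.dropWhile (· = p) := by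
    simp [List.takeWhile_append_dropWhile]
  have hlen : i < (p :: rest.takeWhile (· = p)).length := by simpa using hi
  rw [hsplit, List.getElem?_append_left hlen, List.getElem?_eq_getElem hlen]
  have hmem := List.getElem_mem hlen
  rcases List.mem_cons.mp hmem with h | h
  · simp [h]
  · have := List.mem_takeWhile_imp h
    simp_all
-- Past the leading run, lookups land in the dropWhile suffix.
theorem mtir_get_tail (p : String × Int) (rest : List (String × Int)) (j : Nat) :
    (p :: rest)[(rest.takeWhile (· = p)).length + 1 + j]? = (rest.dropWhile (· = p))[j]? := by
  have hsplit : p :: rest = (p :: rest.takeWhile (· = p)) ++ rest.dropWhile (· = p) := by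
    simp [List.takeWhile_append_dropWhile]
  rw [hsplit, List.getElem?_append_right (by simp)]
  simp

-- The run-start indices of p :: rest: 0, then those of the suffix shifted by the run length.
theorem mtir_starts_part1 (p : String × Int) (rest : List (String × Int)) :
    (List.range ((rest.takeWhile (· = p)).length + 1)).filter
      (fun i => i == 0 || decide ((p :: rest)[i]? ≠ (p :: rest)[i - 1]?)) = [0] := by
  have hk1 : (rest.takeWhile (· = p)).length + 1 = 1 + (rest.takeWhile (· = p)).length := by omega
  rw [hk1, List.range_add, List.filter_append]
  have h0 : (List.range 1).filter
      (fun i => i == 0 || decide ((p :: rest)[i]? ≠ (p :: rest)[i - 1]?)) = [0] := by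
    simp [List.range_one]
  have hrest : (List.filter (fun i => i == 0 || decide ((p :: rest)[i]? ≠ (p :: rest)[i - 1]?))
      ((List.range (rest.takeWhile (· = p)).length).map (fun x => 1 + x))) = [] := by
    rw [List.filter_eq_nil_iff]
    intro a ha
    rcases List.mem_map.mp ha with ⟨j, hj, rfl⟩
    have hjlt := List.mem_range.mp hj
    have h1 : (p :: rest)[1 + j]? = some p := mtir_get_run p rest (by omega)
    have h2 : (p :: rest)[j]? = some p := mtir_get_run p rest (by omega)
    simp [h1, h2]
  rw [h0, hrest, List.append_nil]

theorem mtir_starts_part2 (p : String × Int) (rest : List (String × Int)) :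
    List.filter (fun i => i == 0 || decide ((p :: rest)[i]? ≠ (p :: rest)[i - 1]?))
      ((List.range (rest.dropWhile (· = p)).length).map
        (fun x => (rest.takeWhile (· = p)).length + 1 + x)) =
    List.map (fun x => x + ((rest.takeWhile (· = p)).length + 1))
      (mtirStarts (rest.dropWhile (· = p))) := by
  rw [List.filter_map]
  unfold mtirStarts
  have hcong : List.filter
      ((fun i => i == 0 || decide ((p :: rest)[i]? ≠ (p :: rest)[i - 1]?)) ∘
        (fun x => (rest.takeWhile (· = p)).length + 1 + x))
      (List.range (rest.dropWhile (· = p)).length) =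
      List.filter (fun j => j == 0 ||
        decide ((rest.dropWhile (· = p))[j]? ≠ (rest.dropWhile (· = p))[j - 1]?))
      (List.range (rest.dropWhile (· = p)).length) := by
    apply List.filter_congr
    intro j hj
    have hjlt := List.mem_range.mp hj
    cases j with
    | zero =>
      obtain ⟨y, ys', hys⟩ : ∃ y ys', rest.dropWhile (· = p) = y :: ys' := by
        cases h : rest.dropWhile (· = p) with
        | nil => rw [h] at hjlt; simp at hjlt
        | cons a b => exact ⟨a, b, rfl⟩
      have hget : (p :: rest)[(rest.takeWhile (· = p)).length + 1 + 0]? = some y := by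
        rw [mtir_get_tail, hys]; simp
      have hget1 : (p :: rest)[(rest.takeWhile (· = p)).length]? = some p :=
        mtir_get_run p rest (by omega)
      have hne := mtir_drop_head_ne rest p y ys' hys
      simp [Function.comp, hget, hget1, hne]
    | succ j' =>
      have hget : (p :: rest)[(rest.takeWhile (· = p)).length + 1 + (j' + 1)]? =
          (rest.dropWhile (· = p))[j' + 1]? := mtir_get_tail p rest (j' + 1)
      have hget1 : (p :: rest)[(rest.takeWhile (· = p)).length + 1 + j']? =
          (rest.dropWhile (· = p))[j']? := mtir_get_tail p rest j'
      have hnz : (rest.takeWhile (· = p)).length + 1 + (j' + 1) ≠ 0 := by omega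
      simp [Function.comp, hget, hget1]
  rw [hcong]
  apply List.map_congr_left
  intro a _
  omega

theorem mtir_starts_cons (p : String × Int) (rest : List (String × Int)) :
    mtirStarts (p :: rest) =
      0 :: (mtirStarts (rest.dropWhile (· = p))).map
            (· + ((rest.takeWhile (· = p)).length + 1)) := by
  have hlen : (p :: rest).length =
      ((rest.takeWhile (· = p)).length + 1) + (rest.dropWhile (· = p)).length := by
    have h := congrArg List.length (List.takeWhile_append_dropWhile (p := (· = p)) (l := rest))
    simp only [List.length_append] at h
    simp only [List.length_cons]
    omega
  unfold mtirStarts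
  rw [hlen, List.range_add, List.filter_append, mtir_starts_part1, mtir_starts_part2]
  rfl

-- zip after shifting all indices by k = mapping the shift over the unshifted zip.
theorem mtir_zip_shift (k m : Nat) (a b : List Nat) :
    ((a.map (· + k)).zip (b.map (· + k) ++ [m + k])) =
      ((a.zip (b ++ [m])).map (fun se => (se.1 + k, se.2 + k))) := by
  have hb : b.map (· + k) ++ [m + k] = (b ++ [m]).map (· + k) := by simp
  rw [hb, List.zip_map]
  apply List.map_congr_left
  intro se _
  cases se
  rfl

-- The shifted tail of B's assembly over p :: rest equals B's assembly over the suffix.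
theorem mtir_tail_eq (xs ys : List (String × Int)) (k : Nat) (M : List Nat) (m : Nat)
    (hget : ∀ j, xs[k + j]? = ys[j]?) :
    List.map (fun se => match xs[se.1]? with
        | some p => (p.1, p.2, ((se.2 : Int) - (se.1 : Int)))
        | none => ("", 0, 0))
      ((k :: List.map (· + k) M).zip (List.map (· + k) M ++ [m + k])) =
    List.map (fun se => match ys[se.1]? with
        | some p => (p.1, p.2, ((se.2 : Int) - (se.1 : Int)))
        | none => ("", 0, 0))
      ((0 :: M).zip (M ++ [m])) := by
  have hc : k :: List.map (· + k) M = List.map (· + k) (0 :: M) := by simp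
  rw [hc, mtir_zip_shift, List.map_map]
  apply List.map_congr_left
  intro se _
  cases se with
  | mk s e =>
    simp only [Function.comp]
    have h1 : xs[s + k]? = ys[s]? := by rw [Nat.add_comm]; exact hget s
    rw [h1]
    cases hq : ys[s]? with
    | none => rfl
    | some q =>
      simp

-- B equals the reference run-length encoder.
theorem mtir_alt_eq_rle (xs : List (String × Int)) :
    merge_token_in_report_alt xs = mtirRLE xs := by
  cases xs with
  | nil => simp [merge_token_in_report_alt, mtirStarts, mtirRLE]
  | cons p rest =>
    have hrec : merge_token_in_report_alt (rest.dropWhile (· = p)) =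
        mtirRLE (rest.dropWhile (· = p)) := mtir_alt_eq_rle (rest.dropWhile (· = p))
    have hlen : (p :: rest).length =
        (rest.dropWhile (· = p)).length + ((rest.takeWhile (· = p)).length + 1) := by
      have h := congrArg List.length (List.takeWhile_append_dropWhile (p := (· = p)) (l := rest))
      simp only [List.length_append] at h
      simp only [List.length_cons]
      omega
    rw [mtir_rle_cons, ← hrec]
    unfold merge_token_in_report_alt
    rw [mtir_starts_cons, hlen]
    cases h : rest.dropWhile (· = p) with
    | nil =>
      rw [h] at *
      simp [mtirStarts]
      ring
    | cons y ys' =>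
      rw [h] at hrec hlen
      rw [mtir_starts_cons y ys']
      set M := (mtirStarts (ys'.dropWhile (· = y))).map (· + ((ys'.takeWhile (· = y)).length + 1)) with hM
      simp only [List.map_cons, List.drop_succ_cons, List.drop_zero, List.cons_append,
        List.zip_cons_cons, List.map_cons, List.getElem?_cons_zero, Nat.zero_add]
      congr 1
      · push_cast
        ring_nf
      · exact mtir_tail_eq (p :: rest) (y :: ys')
          ((rest.takeWhile (· = p)).length + 1) M (y :: ys').length
          (fun j => h ▸ mtir_get_tail p rest j)
  termination_by xs.length
  decreasing_by simpa using Nat.lt_succ_of_le (List.length_dropWhile_le _ _)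

-- ===== VERDICT (by name: the statement is the Claim_ definition above) =====
theorem merge_token_in_report_spec : Claim_equal_merge_token_in_report := by
  intro xs _
  unfold Spec_merge_token_in_report
  rw [mtir_A_eq_rle, mtir_alt_eq_rle]
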